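/- GENERATED by c/gen_decode.py: decode facts of the image, one per distinct instruction byte string. -/
import UserX.DecodeImage

#decode_all Toy.Dec
  "4863eb"  -- movsxd rbp,ebx
  "4889e3"  -- mov rbx,rsp
  "4989dc"  -- mov r12,rbx
  "7ec2"  -- jle 105238
  "b840000000"  -- mov eax,0x40
  "e82fc0ffff"  -- call 101440
  "e8f1000000"  -- call 105180
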